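-- pv_equiv track=rewrite | github.com/judithvdw/AOC2021 | 5.py | get_diagonal_points
-- ===== SOURCE A (Python) =====
-- def get_diagonal_points(cords):
--     if cords[0][0] < cords[1][0]:
--         xs = [i for i in range(cords[0][0], cords[1][0] + 1)]
--     else:
--         xs = [i for i in range(cords[1][0], cords[0][0] + 1)][::-1]
--     if cords[0][1] < cords[1][1]:
--         ys = [i for i in range(cords[0][1], cords[1][1] + 1)]
--     else:
--         ys = [i for i in range(cords[1][1], cords[0][1] + 1)][::-1]
--     points = list(zip(xs, ys))
--     return points
-- ===== SOURCE B (Python) =====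
-- def get_diagonal_points(cords):
--     x0, y0 = cords[0][0], cords[0][1]
--     x1, y1 = cords[1][0], cords[1][1]
--     sx = 1 if x0 < x1 else (-1 if x1 < x0 else 0)
--     sy = 1 if y0 < y1 else (-1 if y1 < y0 else 0)
--     n = min(abs(x1 - x0), abs(y1 - y0)) + 1
--     return [(x0 + i * sx, y0 + i * sy) for i in range(n)]
-- ===== Notes on version B (the rewrite author's own statement) =====
-- stated objective: simpler
-- what changed: B computes per-axis step directions and the truncated point count and emits the points in one direct pass (x0+i*sx, y0+i*sy), replacing A's four-branch construction of two range lists (one reversed) and the zip.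
import Mathlib
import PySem

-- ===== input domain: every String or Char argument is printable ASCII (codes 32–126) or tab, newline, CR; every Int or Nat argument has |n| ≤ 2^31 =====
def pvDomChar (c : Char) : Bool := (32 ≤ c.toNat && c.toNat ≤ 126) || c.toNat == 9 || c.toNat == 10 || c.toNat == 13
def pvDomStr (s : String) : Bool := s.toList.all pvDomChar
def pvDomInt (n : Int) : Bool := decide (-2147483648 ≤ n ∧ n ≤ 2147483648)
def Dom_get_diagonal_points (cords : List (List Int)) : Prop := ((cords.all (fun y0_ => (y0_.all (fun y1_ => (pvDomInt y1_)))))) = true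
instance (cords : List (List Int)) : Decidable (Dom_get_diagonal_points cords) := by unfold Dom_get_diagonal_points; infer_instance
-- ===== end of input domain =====

-- B builds the points directly in one pass from per-axis step directions and the truncated
-- point count, instead of building two range lists (one reversed) and zipping them (objective: simpler).

-- ===== PORT A =====
def get_diagonal_points (cords : List (List Int)) : List (Int × Int) :=
  let r0 := PySem.List.pyGetD cords 0 []
  let r1 := PySem.List.pyGetD cords 1 []
  let xs : List Int :=
    if PySem.List.pyGetD r0 0 0 < PySem.List.pyGetD r1 0 0 then
      PySem.List.pyRange (PySem.List.pyGetD r0 0 0) (PySem.List.pyGetD r1 0 0 + 1) 1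
    else
      (PySem.List.slice? (PySem.List.pyRange (PySem.List.pyGetD r1 0 0) (PySem.List.pyGetD r0 0 0 + 1) 1) none none (-1)).getD []
  let ys : List Int :=
    if PySem.List.pyGetD r0 1 0 < PySem.List.pyGetD r1 1 0 then
      PySem.List.pyRange (PySem.List.pyGetD r0 1 0) (PySem.List.pyGetD r1 1 0 + 1) 1
    else
      (PySem.List.slice? (PySem.List.pyRange (PySem.List.pyGetD r1 1 0) (PySem.List.pyGetD r0 1 0 + 1) 1) none none (-1)).getD []
  List.zip xs ys

-- ===== PORT B =====
def get_diagonal_points_alt (cords : List (List Int)) : List (Int × Int) :=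
  let x0 := PySem.List.pyGetD (PySem.List.pyGetD cords 0 []) 0 0
  let y0 := PySem.List.pyGetD (PySem.List.pyGetD cords 0 []) 1 0
  let x1 := PySem.List.pyGetD (PySem.List.pyGetD cords 1 []) 0 0
  let y1 := PySem.List.pyGetD (PySem.List.pyGetD cords 1 []) 1 0
  let sx : Int := if x0 < x1 then 1 else if x1 < x0 then -1 else 0
  let sy : Int := if y0 < y1 then 1 else if y1 < y0 then -1 else 0
  let n : Int := min ((x1 - x0).natAbs : Int) ((y1 - y0).natAbs : Int) + 1
  (PySem.List.pyRange 0 n 1).map (fun i => (x0 + i * sx, y0 + i * sy))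

-- ===== PRECONDITION & SPEC =====
-- Pre_: the Python A raises IndexError unless cords has at least two rows and each of the
-- first two rows has at least two entries; exactly those inputs are admitted.
def Pre_get_diagonal_points (cords : List (List Int)) : Prop :=
  2 ≤ cords.length ∧ 2 ≤ (cords.getD 0 []).length ∧ 2 ≤ (cords.getD 1 []).length
instance (cords : List (List Int)) : Decidable (Pre_get_diagonal_points cords) := by unfold Pre_get_diagonal_points; infer_instance
def pvWitness_get_diagonal_points : List (List Int) := [[1, 5], [4, 2]]
def Spec_get_diagonal_points (cords : List (List Int)) (out : List (Int × Int)) : Prop := out = get_diagonal_points_alt cords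
instance (cords : List (List Int)) (out : List (Int × Int)) : Decidable (Spec_get_diagonal_points cords out) := by unfold Spec_get_diagonal_points; infer_instance

-- ===== CLAIM (what is proved, stated in full; the proofs are below) =====
def Claim_equal_get_diagonal_points : Prop := ∀ (cords : List (List Int)), Dom_get_diagonal_points cords → Pre_get_diagonal_points cords → Spec_get_diagonal_points cords (get_diagonal_points cords)

-- ===== LEMMAS AND PROOFS =====

-- zip of two maps over ranges truncates to the shorter range
theorem zip_map_range {α β : Type} (f : Nat → α) (g : Nat → β) (n m : Nat) :
    List.zip ((List.range n).map f) ((List.range m).map g)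
      = (List.range (min n m)).map (fun k => (f k, g k)) := by
  apply List.ext_getElem
  · simp
  · intro i h1 h2
    simp [List.getElem_zip]

-- A's branch for one axis, as a map over a Nat range
theorem axisA_eq (a b : Int) :
    (if a < b then PySem.List.pyRange a (b + 1) 1
     else (PySem.List.slice? (PySem.List.pyRange b (a + 1) 1) none none (-1)).getD [])
      = (List.range ((b - a).natAbs + 1)).map
          (fun k : Nat => a + (k : Int) * (if a < b then 1 else if b < a then -1 else 0)) := by
  split_ifs with h1 h2
  · rw [PySem.List.pyRange_one]
    have : (b + 1 - a).toNat = (b - a).natAbs + 1 := by omega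
    rw [this]
    exact List.map_congr_left (fun k _ => by ring)
  · have h := PySem.List.pyRange_neg_one_eq_reverse a (b - 1)
    rw [show b - 1 + 1 = b by ring] at h
    rw [PySem.List.slice?_none_none_neg_one, Option.getD_some, ← h,
       PySem.List.pyRange_neg_one]
    have : (a - (b - 1)).toNat = (b - a).natAbs + 1 := by omega
    rw [this]
    exact List.map_congr_left (fun k _ => by ring)
  · have hab : a = b := by omega
    subst hab
    have h := PySem.List.pyRange_neg_one_eq_reverse a (a - 1)
    rw [show a - 1 + 1 = a by ring] at h
    rw [PySem.List.slice?_none_none_neg_one, Option.getD_some, ← h,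
       PySem.List.pyRange_neg_one]
    have : (a - (a - 1)).toNat = (a - a).natAbs + 1 := by omega
    rw [this]
    refine List.map_congr_left (fun k hk => ?_)
    simp only [List.mem_range] at hk
    have : k = 0 := by omega
    subst this
    simp

-- ===== VERDICT (by name: the statement is the Claim_ definition above) =====

theorem get_diagonal_points_spec : Claim_equal_get_diagonal_points := by
  intro cords _ _
  unfold Spec_get_diagonal_points get_diagonal_points get_diagonal_points_alt
  simp only []
  set x0 := PySem.List.pyGetD (PySem.List.pyGetD cords 0 []) 0 0 with hx0
  set y0 := PySem.List.pyGetD (PySem.List.pyGetD cords 0 []) 1 0 with hy0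
  set x1 := PySem.List.pyGetD (PySem.List.pyGetD cords 1 []) 0 0 with hx1
  set y1 := PySem.List.pyGetD (PySem.List.pyGetD cords 1 []) 1 0 with hy1
  rw [axisA_eq x0 x1, axisA_eq y0 y1, zip_map_range]
  have hn : (min ((x1 - x0).natAbs : Int) ((y1 - y0).natAbs : Int) + 1 - 0).toNat
      = min ((x1 - x0).natAbs + 1) ((y1 - y0).natAbs + 1) := by omega
  rw [PySem.List.pyRange_one, hn, List.map_map]
  exact List.map_congr_left (fun k _ => by simp)
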